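-- pv_equiv track=rewrite | github.com/slavah8/leetcode | 3101-maximum-coins-heroes-can-collect/3101-maximum-coins-heroes-can-collect.py | maximumCoins
-- ===== SOURCE A (Python) =====
-- from typing import List
--
-- def maximumCoins(heroes: List[int], monsters: List[int], coins: List[int]) -> List[int]:
--     # (monster_power, coin), sorted by power
--     monster_coin = sorted(zip(monsters, coins), key=lambda x: x[0])
--
--     # (hero_power, original_index), sorted by power
--     heroes_sorted = sorted((h, i) for i, h in enumerate(heroes))
--
--     N = len(heroes)
--     M = len(monsters)
--     i = 0
--     j = 0
--     total = 0
--     ans = [0] * N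
--     while i < N:
--         h, orig_idx = heroes_sorted[i]
--
--         while j < M and monster_coin[j][0] <= h:
--             total += monster_coin[j][1]
--             j += 1
--         ans[orig_idx] = total
--         i += 1
--     return ans
-- ===== SOURCE B (Python) =====
-- from typing import List
--
-- def maximumCoins(heroes: List[int], monsters: List[int], coins: List[int]) -> List[int]:
--     pairs = list(zip(monsters, coins))
--     return [sum(c for p, c in pairs if p <= h) for h in heroes]
-- ===== Notes on version B (the rewrite author's own statement) =====
-- stated objective: simpler
-- what changed: Replaces the double sort (monsters by power, heroes with indices) plus incremental two-pointer sweep and scattered writes into a preallocated answer array by a direct one-liner: zip monsters with coins once and, for each hero in original order, sum the coins of pairs with power <= hero.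
-- crash fix: When len(coins) < len(monsters) and some hero is at least as strong as every monster in monsters[:len(coins)], A raises IndexError (zip truncates the pair list but the inner loop bound is len(monsters)); B returns the coin sums over the truncated pairs, e.g. [3] on ([5],[1,2],[3]). — e.g. on maximumCoins([5], [1, 2], [3]): A raises IndexError, B returns [3]
import Mathlib
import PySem

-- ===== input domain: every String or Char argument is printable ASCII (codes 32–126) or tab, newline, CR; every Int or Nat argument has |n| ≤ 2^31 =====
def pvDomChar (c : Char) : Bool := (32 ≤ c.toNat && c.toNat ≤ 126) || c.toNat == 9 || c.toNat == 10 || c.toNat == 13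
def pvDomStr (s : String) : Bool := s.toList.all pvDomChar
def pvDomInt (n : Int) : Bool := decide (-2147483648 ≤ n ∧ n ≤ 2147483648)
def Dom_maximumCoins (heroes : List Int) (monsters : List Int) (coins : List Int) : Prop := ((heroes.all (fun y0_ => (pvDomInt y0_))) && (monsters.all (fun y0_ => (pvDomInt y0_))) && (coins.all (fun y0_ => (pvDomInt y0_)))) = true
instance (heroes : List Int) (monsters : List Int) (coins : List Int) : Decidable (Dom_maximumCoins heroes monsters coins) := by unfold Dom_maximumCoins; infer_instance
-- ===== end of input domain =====

-- B replaces A's double sort plus two-pointer sweep by a direct per-hero sum over the zipped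
-- (monster, coin) pairs: simpler, no sorting, answers built in original hero order.

-- ===== PORT A =====
-- inner 'while j < M and monster_coin[j][0] <= h' loop; where Python raises IndexError
-- (j reaches the end of the truncated pair list while j < M) the port stops — those
-- inputs are excluded by Pre_maximumCoins.
def aInner (mc : List (Int × Int)) (M : Nat) (h : Int) (j : Nat) (total : Int) : Nat × Int :=
  if _hj : j < M then
    match mc[j]? with
    | some pc => if pc.1 ≤ h then aInner mc M h (j + 1) (total + pc.2) else (j, total)
    | none => (j, total)
  else (j, total)
termination_by M - j
decreasing_by omega

-- outer 'while i < N' loop over heroes_sorted, carrying (j, total) and writing ans[orig_idx]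
def aOuter (mc : List (Int × Int)) (M : Nat) (hs : List (Int × Int)) (j : Nat) (total : Int)
    (ans : List Int) : List Int :=
  match hs with
  | [] => ans
  | (h, idx) :: rest =>
      let r := aInner mc M h j total
      aOuter mc M rest r.1 r.2 (ans.set idx.toNat r.2)

def maximumCoins (heroes : List Int) (monsters : List Int) (coins : List Int) : List Int :=
  let monster_coin := PySem.List.sorted (monsters.zip coins) (fun x => x.1)
  let heroes_sorted :=
    PySem.List.sorted2 ((PySem.List.enumerate heroes 0).map (fun p => (p.2, p.1)))
      (fun x => x.1) (fun x => x.2)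
  let N := heroes.length
  let M := monsters.length
  aOuter monster_coin M heroes_sorted 0 0 (List.replicate N 0)

-- ===== PORT B =====
def maximumCoins_alt (heroes : List Int) (monsters : List Int) (coins : List Int) : List Int :=
  let pairs := monsters.zip coins
  heroes.map (fun h => ((pairs.filter (fun x => decide (x.1 ≤ h))).map (fun x => x.2)).sum)

-- ===== PRECONDITION & SPEC =====
-- Pre_ excludes exactly the inputs on which A raises IndexError: len(coins) < len(monsters)
-- and some hero at least as strong as every power in monsters[:len(coins)] (zip truncates
-- the pair list, but the inner loop bound is len(monsters)).
def Pre_maximumCoins (heroes : List Int) (monsters : List Int) (coins : List Int) : Prop :=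
  monsters.length ≤ coins.length ∨ ∀ h ∈ heroes, ∃ p ∈ monsters.take coins.length, h < p
instance (heroes : List Int) (monsters : List Int) (coins : List Int) :
    Decidable (Pre_maximumCoins heroes monsters coins) := by unfold Pre_maximumCoins; infer_instance
def pvWitness_maximumCoins : List Int × List Int × List Int := ([1, 2], [1], [7])

-- On inputs with len(coins) < len(monsters) and some hero ≥ every power in monsters[:len(coins)],
-- A raises IndexError while B returns the coin sums over the truncated zipped pairs.
def Raises_maximumCoins (heroes : List Int) (monsters : List Int) (coins : List Int) : Prop :=
  coins.length < monsters.length ∧ ∃ h ∈ heroes, ∀ p ∈ monsters.take coins.length, p ≤ h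
instance (heroes : List Int) (monsters : List Int) (coins : List Int) :
    Decidable (Raises_maximumCoins heroes monsters coins) := by unfold Raises_maximumCoins; infer_instance
def pvRaiseWitness_maximumCoins : List Int × List Int × List Int := ([5], [1, 2], [3])
def pvRaiseWitnessOut_maximumCoins : List Int := [3]

def Spec_maximumCoins (heroes : List Int) (monsters : List Int) (coins : List Int) (out : List Int) : Prop := out = maximumCoins_alt heroes monsters coins
instance (heroes : List Int) (monsters : List Int) (coins : List Int) (out : List Int) : Decidable (Spec_maximumCoins heroes monsters coins out) := by unfold Spec_maximumCoins; infer_instance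

-- ===== CLAIM (what is proved, stated in full; the proofs are below) =====
def Claim_equal_maximumCoins : Prop := ∀ (heroes : List Int) (monsters : List Int) (coins : List Int), Dom_maximumCoins heroes monsters coins → Pre_maximumCoins heroes monsters coins → Spec_maximumCoins heroes monsters coins (maximumCoins heroes monsters coins)
def Claim_raises_maximumCoins : Prop := (∀ (heroes : List Int) (monsters : List Int) (coins : List Int), Dom_maximumCoins heroes monsters coins → Raises_maximumCoins heroes monsters coins → ¬ Pre_maximumCoins heroes monsters coins) ∧ (Dom_maximumCoins (pvRaiseWitness_maximumCoins.1) (pvRaiseWitness_maximumCoins.2.1) (pvRaiseWitness_maximumCoins.2.2) ∧ Raises_maximumCoins (pvRaiseWitness_maximumCoins.1) (pvRaiseWitness_maximumCoins.2.1) (pvRaiseWitness_maximumCoins.2.2) ∧ maximumCoins_alt (pvRaiseWitness_maximumCoins.1) (pvRaiseWitness_maximumCoins.2.1) (pvRaiseWitness_maximumCoins.2.2) = pvRaiseWitnessOut_maximumCoins)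

-- ===== LEMMAS AND PROOFS =====

-- coins collected from all zipped pairs whose power is ≤ h (the value both programs compute)
def gsum (mc : List (Int × Int)) (h : Int) : Int :=
  ((mc.filter (fun x => decide (x.1 ≤ h))).map (fun x => x.2)).sum

lemma aInner_eq (mc : List (Int × Int)) (M : Nat) (hM : mc.length ≤ M) (h : Int) :
    ∀ (n j : Nat), mc.length - j ≤ n → ∀ (total : Int),
      aInner mc M h j total =
        (j + ((mc.drop j).takeWhile (fun x => decide (x.1 ≤ h))).length,
         total + (((mc.drop j).takeWhile (fun x => decide (x.1 ≤ h))).map (fun x => x.2)).sum) := by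
  intro n
  induction n with
  | zero =>
      intro j hle total
      have hj : mc.length ≤ j := by omega
      rw [aInner]
      simp [List.drop_eq_nil_of_le hj, List.getElem?_eq_none hj]
  | succ n ih =>
      intro j hle total
      by_cases hj : j < mc.length
      · have hjM : j < M := lt_of_lt_of_le hj hM
        have hdrop : mc.drop j = mc[j] :: mc.drop (j + 1) := List.drop_eq_getElem_cons hj
        rw [aInner]
        simp only [hjM, dif_pos, List.getElem?_eq_getElem hj]
        by_cases hph : mc[j].1 ≤ h
        · rw [if_pos (by exact hph)]
          rw [ih (j + 1) (by omega) (total + mc[j].2)]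
          rw [hdrop]
          simp only [List.takeWhile_cons, hph, decide_true, if_true, List.length_cons,
            List.map_cons, List.sum_cons, Prod.mk.injEq]
          constructor
          · omega
          · ring
        · rw [if_neg (by exact hph)]
          rw [hdrop, List.takeWhile_cons]
          simp [hph]
      · have hj' : mc.length ≤ j := by omega
        rw [aInner]
        simp [List.drop_eq_nil_of_le hj', List.getElem?_eq_none hj']

lemma takeWhile_split {α : Type} (p q : α → Bool) :
    ∀ l : List α, (∀ x ∈ l, p x = true → q x = true) →
      l.takeWhile q = l.takeWhile p ++ (l.dropWhile p).takeWhile q := by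
  intro l
  induction l with
  | nil => simp
  | cons a t ih =>
      intro hpq
      by_cases hp : p a = true
      · have hq := hpq a (by simp) hp
        simp [hp, hq, ih (fun x hx hpx => hpq x (by simp [hx]) hpx)]
      · simp [hp]

lemma takeWhile_filter (h : Int) :
    ∀ mc : List (Int × Int), mc.Pairwise (fun a b => a.1 ≤ b.1) →
      mc.takeWhile (fun x => decide (x.1 ≤ h)) = mc.filter (fun x => decide (x.1 ≤ h)) := by
  intro mc
  induction mc with
  | nil => simp
  | cons a t ih =>
      intro hpw
      rcases List.pairwise_cons.mp hpw with ⟨hhead, htail⟩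
      by_cases hah : a.1 ≤ h
      · simp [hah, ih htail]
      · have hnil : t.filter (fun x => decide (x.1 ≤ h)) = [] := by
          rw [List.filter_eq_nil_iff]
          intro x hx
          simp only [decide_eq_true_eq]
          intro hxh
          exact hah (le_trans (hhead x hx) hxh)
        simp [hah, hnil]

lemma drop_takeWhile_length {α : Type} (p : α → Bool) (l : List α) :
    l.drop (l.takeWhile p).length = l.dropWhile p := by
  nth_rewrite 2 [← List.takeWhile_append_dropWhile (p := p) (l := l)]
  rw [List.drop_left]

lemma insertBy_pairwise {α : Type} (before : α → α → Bool) (R : α → α → Prop)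
    (htrans : ∀ a b c, R a b → R b c → R a c)
    (h1 : ∀ a b, before a b = true → R a b) (h2 : ∀ a b, before a b = false → R b a) :
    ∀ (l : List α) (x : α), l.Pairwise R → (PySem.List.insertBy before x l).Pairwise R := by
  intro l
  induction l with
  | nil => intro x _; simp [PySem.List.insertBy]
  | cons y ys ih =>
      intro x hp
      rcases List.pairwise_cons.mp hp with ⟨hhead, htail⟩
      by_cases hb : before x y = true
      · rw [PySem.List.insertBy, if_pos hb]
        refine List.pairwise_cons.mpr ⟨?_, hp⟩
        intro z hz
        rcases List.mem_cons.mp hz with rfl | hz'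
        · exact h1 _ _ hb
        · exact htrans _ _ _ (h1 _ _ hb) (hhead z hz')
      · rw [PySem.List.insertBy, if_neg hb]
        refine List.pairwise_cons.mpr ⟨?_, ih x htail⟩
        intro z hz
        rcases (PySem.List.mem_insertBy before x z ys).mp hz with rfl | hz'
        · exact h2 _ _ (by simpa using hb)
        · exact hhead z hz'

lemma foldl_insertBy_pairwise {α : Type} (before : α → α → Bool) (R : α → α → Prop)
    (htrans : ∀ a b c, R a b → R b c → R a c)
    (h1 : ∀ a b, before a b = true → R a b) (h2 : ∀ a b, before a b = false → R b a) :
    ∀ (xs acc : List α), acc.Pairwise R →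
      (xs.foldl (fun acc x => PySem.List.insertBy before x acc) acc).Pairwise R := by
  intro xs
  induction xs with
  | nil => intro acc h; simpa using h
  | cons x t ih =>
      intro acc h
      exact ih _ (insertBy_pairwise before R htrans h1 h2 acc x h)

lemma sorted2_pairwise_fst (xs : List (Int × Int)) :
    (PySem.List.sorted2 xs (fun x => x.1) (fun x => x.2)).Pairwise (fun a b => a.1 ≤ b.1) := by
  unfold PySem.List.sorted2
  simp only [if_neg (by decide : ¬ (false = true))]
  apply foldl_insertBy_pairwise _ (fun a b : Int × Int => a.1 ≤ b.1)
  · intro a b c hab hbc; exact le_trans hab hbc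
  · intro a b hb
    simp only [Bool.or_eq_true, Bool.and_eq_true, Bool.not_eq_true', decide_eq_true_eq,
      decide_eq_false_iff_not] at hb
    rcases hb with hlt | ⟨hnlt, _⟩
    · exact le_of_lt hlt
    · exact not_lt.mp hnlt
  · intro a b hb
    simp only [Bool.or_eq_false_iff, Bool.and_eq_false_iff, Bool.not_eq_false',
      decide_eq_true_eq, decide_eq_false_iff_not] at hb
    exact not_lt.mp hb.1
  · exact List.Pairwise.nil

lemma aOuter_eq (mc : List (Int × Int)) (M : Nat) (hM : mc.length ≤ M)
    (hmc : mc.Pairwise (fun a b => a.1 ≤ b.1)) :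
    ∀ (hs : List (Int × Int)) (p : Int × Int → Bool) (ans : List Int),
      hs.Pairwise (fun a b => a.1 ≤ b.1) →
      (∀ x ∈ mc, p x = true → ∀ hp ∈ hs, x.1 ≤ hp.1) →
      aOuter mc M hs (mc.takeWhile p).length (((mc.takeWhile p).map (fun x => x.2)).sum) ans
        = hs.foldl (fun acc hp => acc.set hp.2.toNat (gsum mc hp.1)) ans := by
  intro hs
  induction hs with
  | nil => intro p ans _ _; rfl
  | cons hd rest ih =>
      intro p ans hpw himp
      obtain ⟨h, idx⟩ := hd
      rcases List.pairwise_cons.mp hpw with ⟨hhead, htail⟩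
      have hq : ∀ x ∈ mc, p x = true → decide (x.1 ≤ h) = true := by
        intro x hx hpx
        simpa using himp x hx hpx (h, idx) (by simp)
      have hsplit := takeWhile_split p (fun x => decide (x.1 ≤ h)) mc hq
      show aOuter mc M ((h, idx) :: rest) _ _ ans = _
      rw [aOuter]
      rw [aInner_eq mc M hM h mc.length _ (by omega)]
      rw [drop_takeWhile_length]
      have hlen : (mc.takeWhile p).length
            + ((mc.dropWhile p).takeWhile (fun x => decide (x.1 ≤ h))).length
          = (mc.takeWhile (fun x => decide (x.1 ≤ h))).length := by
        rw [hsplit, List.length_append]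
      have hsum : ((mc.takeWhile p).map (fun x => x.2)).sum
            + (((mc.dropWhile p).takeWhile (fun x => decide (x.1 ≤ h))).map (fun x => x.2)).sum
          = ((mc.takeWhile (fun x => decide (x.1 ≤ h))).map (fun x => x.2)).sum := by
        rw [hsplit, List.map_append, List.sum_append]
      simp only [hlen, hsum]
      have hg : ((mc.takeWhile (fun x => decide (x.1 ≤ h))).map (fun x => x.2)).sum = gsum mc h := by
        rw [takeWhile_filter h mc hmc]; rfl
      rw [ih (fun x => decide (x.1 ≤ h)) _ htail ?_]
      · rw [List.foldl_cons, hg]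
      · intro x hx hqx hp' hp'mem
        have hxh : x.1 ≤ h := by simpa using hqx
        exact le_trans hxh (hhead hp' hp'mem)

lemma foldl_set_enum (g : Int → Int) :
    ∀ (hs : List Int) (s : Nat) (ans : List Int), ans.length = s + hs.length →
      ((PySem.List.enumerate hs (s : Int)).map (fun p => (p.2, p.1))).foldl
          (fun acc hp => acc.set hp.2.toNat (g hp.1)) ans
        = ans.take s ++ hs.map g := by
  intro hs
  induction hs with
  | nil =>
      intro s ans hlen
      simp only [List.length_nil] at hlen
      simp [PySem.List.enumerate_nil, List.take_of_length_le (by omega : ans.length ≤ s)]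
  | cons h t ih =>
      intro s ans hlen
      rw [PySem.List.enumerate_cons]
      simp only [List.map_cons, List.foldl_cons]
      have hcast : (s : Int) + 1 = ((s + 1 : Nat) : Int) := by push_cast; ring
      rw [hcast]
      rw [ih (s + 1) (ans.set (Int.toNat s) (g h))
        (by simp only [List.length_set]; simp only [List.length_cons] at hlen; omega)]
      have hs_lt : s < ans.length := by simp only [List.length_cons] at hlen; omega
      have htake : (ans.set (Int.toNat (s : Int)) (g h)).take (s + 1) = ans.take s ++ [g h] := by
        rw [Int.toNat_natCast]
        rw [List.set_eq_take_append_cons_drop, if_pos hs_lt]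
        rw [List.take_append]
        simp [List.length_take, Nat.min_eq_left (le_of_lt hs_lt)]
      rw [Int.toNat_natCast] at htake ⊢
      rw [htake, List.append_assoc]
      simp

lemma mem_swenum (heroes : List Int) (x : Int × Int) :
    x ∈ (PySem.List.enumerate heroes 0).map (fun p => (p.2, p.1)) ↔
      ∃ (k : Nat) (h : k < heroes.length), x = (heroes[k], (k : Int)) := by
  simp only [List.mem_map]
  constructor
  · rintro ⟨p, hp, rfl⟩
    rcases (PySem.List.mem_enumerate_iff _ _ _).mp hp with ⟨k, hk, rfl⟩
    exact ⟨k, hk, by simp⟩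
  · rintro ⟨k, hk, rfl⟩
    exact ⟨((k : Int), heroes[k]), (PySem.List.mem_enumerate_iff _ _ _).mpr ⟨k, hk, by simp⟩, rfl⟩

lemma gsum_sorted (monsters coins : List Int) (h : Int) :
    gsum (PySem.List.sorted (monsters.zip coins) (fun x => x.1)) h = gsum (monsters.zip coins) h := by
  unfold gsum
  exact List.Perm.sum_eq (List.Perm.map _ (List.Perm.filter _
    (PySem.List.sorted_perm (monsters.zip coins) (fun x => x.1) false)))

-- ===== VERDICT (by name: the statement is the Claim_ definition above) =====
-- maximumCoins_spec: A = B on every input of Pre_; maximumCoins_raises: the Raises_ region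
-- (where Python A raises IndexError) lies outside Pre_, and B's port returns [3] at the witness.
theorem maximumCoins_spec : Claim_equal_maximumCoins := by
  intro heroes monsters coins _ _
  unfold Spec_maximumCoins maximumCoins maximumCoins_alt
  set mc := PySem.List.sorted (monsters.zip coins) (fun x => x.1) with hmc_def
  set swenum := (PySem.List.enumerate heroes 0).map (fun p => (p.2, p.1)) with hsw_def
  set hsorted := PySem.List.sorted2 swenum (fun x => x.1) (fun x => x.2) with hhs_def
  have hMlen : mc.length ≤ monsters.length := by
    rw [hmc_def, PySem.List.length_sorted, List.length_zip]; omega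
  have hmcpw : mc.Pairwise (fun a b => a.1 ≤ b.1) := PySem.List.sorted_pairwise _ _
  have hstart :
      aOuter mc monsters.length hsorted 0 0 (List.replicate heroes.length 0)
        = hsorted.foldl (fun acc hp => acc.set hp.2.toNat (gsum mc hp.1))
            (List.replicate heroes.length 0) := by
    have h0 : mc.takeWhile (fun _ : Int × Int => false) = [] := by
      cases mc <;> simp
    have := aOuter_eq mc monsters.length hMlen hmcpw hsorted (fun _ => false)
      (List.replicate heroes.length 0) (sorted2_pairwise_fst swenum)
      (by intro x _ hx; exact absurd hx (by simp))
    rw [h0] at this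
    simpa using this
  have hperm : hsorted.Perm swenum := PySem.List.sorted2_perm _ _ _ _
  have hcomm : ∀ x ∈ hsorted, ∀ y ∈ hsorted, ∀ (z : List Int),
      (z.set x.2.toNat (gsum mc x.1)).set y.2.toNat (gsum mc y.1)
        = (z.set y.2.toNat (gsum mc y.1)).set x.2.toNat (gsum mc x.1) := by
    intro x hx y hy z
    rcases (mem_swenum heroes x).mp (hperm.mem_iff.mp hx) with ⟨kx, hkx, rfl⟩
    rcases (mem_swenum heroes y).mp (hperm.mem_iff.mp hy) with ⟨ky, hky, rfl⟩
    by_cases hk : kx = ky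
    · subst hk; rfl
    · exact List.set_comm _ _ (by simpa using hk)
  have hfold := List.Perm.foldl_eq'
      (f := fun (acc : List Int) (hp : Int × Int) => acc.set hp.2.toNat (gsum mc hp.1))
      hperm hcomm (List.replicate heroes.length (0 : Int))
  have henum := foldl_set_enum (fun h => gsum mc h) heroes 0
      (List.replicate heroes.length 0) (by simp)
  simp only [Nat.cast_zero] at henum
  rw [hstart, hfold, ← hsw_def] at *
  rw [henum]
  simp only [List.take_zero, List.nil_append]
  apply List.map_congr_left
  intro h _
  exact gsum_sorted monsters coins h

@[simp] theorem maximumCoins_raises : Claim_raises_maximumCoins := by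
  unfold Claim_raises_maximumCoins
  constructor
  · intro heroes monsters coins _ hr hpre
    obtain ⟨hlen, h, hmem, hall⟩ := hr
    rcases hpre with hle | hforall
    · omega
    · obtain ⟨p, hp, hlt⟩ := hforall h hmem
      exact absurd hlt (not_lt.mpr (hall p hp))
  · exact ⟨by decide, by decide, by decide⟩
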